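-- pv_equiv track=rewrite | github.com/penta127/py | py03/ex5/ft_data_stream.py | gene_eve
-- ===== SOURCE A (Python) =====
-- def gene_eve(num):
--     players = ["alice", "bob", "charlie"]
--     kinds = ["killed monster", "found treasure", "leveled up"]
--
--     for i in range(num):
--         player = players[i % len(players)]
--         level = (i % 20) + 1
--         kind = kinds[i % len(kinds)]
--         yield player, level, kind
-- ===== SOURCE B (Python) =====
-- def gene_eve(num):
--     players = ["alice", "bob", "charlie"]
--     kinds = ["killed monster", "found treasure", "leveled up"]
--
--     # The stream is periodic with period lcm(3, 20) = 60: build that block once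
--     # by stepping three small counters, then tile it.
--     period = []
--     p, k, lvl = 0, 0, 1
--     for _ in range(60):
--         period.append((players[p], lvl, kinds[k]))
--         p = (p + 1) % 3
--         k = (k + 1) % 3
--         lvl = lvl + 1 if lvl < 20 else 1
--
--     q, r = divmod(max(num, 0), 60)
--     yield from period * q
--     yield from period[:r]
-- ===== Notes on version B (the rewrite author's own statement) =====
-- stated objective: faster
-- what changed: B exploits that the stream is periodic with period lcm(3,20)=60: it precomputes the 60-event block once with small stepping counters, then emits it tiled q times plus a prefix of length r (divmod of num by 60), replacing A's per-item modular indexing over range(num) with C-level list repetition.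
import Mathlib
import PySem

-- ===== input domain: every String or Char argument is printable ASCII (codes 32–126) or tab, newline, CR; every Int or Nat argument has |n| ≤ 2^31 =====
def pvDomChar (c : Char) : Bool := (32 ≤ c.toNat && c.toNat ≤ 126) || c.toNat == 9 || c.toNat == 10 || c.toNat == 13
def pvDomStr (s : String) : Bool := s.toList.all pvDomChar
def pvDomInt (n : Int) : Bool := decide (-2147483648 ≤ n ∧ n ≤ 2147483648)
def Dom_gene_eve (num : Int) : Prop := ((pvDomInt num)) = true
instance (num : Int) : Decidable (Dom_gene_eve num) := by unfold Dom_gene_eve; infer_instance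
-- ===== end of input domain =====

-- B precomputes the 60-event period (lcm of 3 and 20) once and tiles it q times plus a
-- prefix, instead of A's per-item modular indexing over the whole range; measured faster
-- by a constant factor (list repetition runs in C), same observable stream. The Python versions are generators; equivalence
-- is about the produced sequence (as a list).

-- ===== PORT A =====
def pvPlayers : List String := ["alice", "bob", "charlie"]
def pvKinds : List String := ["killed monster", "found treasure", "leveled up"]

-- for i in range(num): yield players[i % 3], (i % 20) + 1, kinds[i % 3]
-- (indexing cannot fail: i ≥ 0 and the mod index is in range, so .getD "" is never used)
def gene_eve (num : Int) : List (String × Int × String) :=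
  (PySem.List.pyRange 0 num 1).map (fun i =>
    ((PySem.List.pyGet? pvPlayers (PySem.Int.mod i (pvPlayers.length : Int))).getD "",
     PySem.Int.mod i 20 + 1,
     (PySem.List.pyGet? pvKinds (PySem.Int.mod i (pvKinds.length : Int))).getD ""))

-- ===== PORT B =====
-- the 60-entry period block, built by stepping counters p, k, lvl (Source B's for-loop)
def pvBlock : List (String × Int × String) :=
  (((List.range 60).foldl
    (fun (st : (Nat × Nat × Int) × List (String × Int × String)) _ =>
      let p := st.1.1; let k := st.1.2.1; let lvl := st.1.2.2
      (((p + 1) % 3, (k + 1) % 3, if lvl < 20 then lvl + 1 else 1),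
       st.2 ++ [(pvPlayers.getD p "", lvl, pvKinds.getD k "")]))
    ((0, 0, 1), []))).2

-- q, r = divmod(max(num, 0), 60); yield from period * q; yield from period[:r]
-- (divmod's divisor 60 ≠ 0, so it cannot raise; ported as floordiv/mod)
def gene_eve_alt (num : Int) : List (String × Int × String) :=
  (List.replicate (PySem.Int.floordiv (max num 0) 60).toNat pvBlock).flatten ++
    PySem.List.slice pvBlock none (some (PySem.Int.mod (max num 0) 60))

-- ===== PRECONDITION & SPEC =====
def Spec_gene_eve (num : Int) (out : List (String × Int × String)) : Prop := out = gene_eve_alt num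
instance (num : Int) (out : List (String × Int × String)) : Decidable (Spec_gene_eve num out) := by unfold Spec_gene_eve; infer_instance

-- ===== CLAIM (what is proved, stated in full; the proofs are below) =====
def Claim_equal_gene_eve : Prop := ∀ (num : Int), Dom_gene_eve num → Spec_gene_eve num (gene_eve num)

-- ===== LEMMAS AND PROOFS =====

-- the tuple A yields at (nonneg) step m
def pvTup (m : Nat) : String × Int × String :=
  ((PySem.List.pyGet? pvPlayers (PySem.Int.mod (m : Int) (pvPlayers.length : Int))).getD "",
   PySem.Int.mod (m : Int) 20 + 1,
   (PySem.List.pyGet? pvKinds (PySem.Int.mod (m : Int) (pvKinds.length : Int))).getD "")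

lemma pvBlock_eq : pvBlock = (List.range 60).map pvTup := by decide

lemma pvTup_periodic (j : Nat) : pvTup (60 + j) = pvTup j := by
  have h3 : (pvPlayers.length : Int) = 3 := by simp [pvPlayers]
  have h3' : (pvKinds.length : Int) = 3 := by simp [pvKinds]
  have m3 : ∀ m : Nat, PySem.Int.mod (m : Int) 3 = ((m % 3 : Nat) : Int) := fun m => by
    exact_mod_cast PySem.Int.mod_natCast m 3
  have m20 : ∀ m : Nat, PySem.Int.mod (m : Int) 20 = ((m % 20 : Nat) : Int) := fun m => by
    exact_mod_cast PySem.Int.mod_natCast m 20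
  simp only [pvTup, h3, h3', m3, m20,
    show (60 + j) % 3 = j % 3 by omega, show (60 + j) % 20 = j % 20 by omega]

lemma tiling (q : Nat) : ∀ r : Nat, r ≤ 60 →
    (List.range (60 * q + r)).map pvTup =
      (List.replicate q ((List.range 60).map pvTup)).flatten ++
        ((List.range 60).map pvTup).take r := by
  induction q with
  | zero =>
    intro r hr
    simp [← List.map_take, List.take_range, Nat.min_eq_left hr]
  | succ q ih =>
    intro r hr
    have : 60 * (q + 1) + r = 60 + (60 * q + r) := by ring
    rw [this, List.range_add, List.map_append, List.map_map]
    have : (List.range (60 * q + r)).map (pvTup ∘ (60 + ·)) =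
        (List.range (60 * q + r)).map pvTup := by
      apply List.map_congr_left
      intro j _
      exact pvTup_periodic j
    rw [this, ih r hr, List.replicate_succ, List.flatten_cons, List.append_assoc]

lemma range_map_eq_tiles (N : Nat) :
    (List.range N).map pvTup =
      (List.replicate (N / 60) ((List.range 60).map pvTup)).flatten ++
        ((List.range 60).map pvTup).take (N % 60) := by
  have h := tiling (N / 60) (N % 60) (by omega)
  rw [show 60 * (N / 60) + N % 60 = N by omega] at h
  exact h

lemma gene_eve_eq_alt (num : Int) : gene_eve num = gene_eve_alt num := by
  have hA : gene_eve num = (List.range num.toNat).map pvTup := by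
    unfold gene_eve
    rw [PySem.List.pyRange_one]
    simp only [Int.sub_zero, List.map_map]
    apply List.map_congr_left
    intro j _
    simp [pvTup, Function.comp]
  have hmax : max num 0 = (num.toNat : Int) := by omega
  have hq : PySem.Int.floordiv ((num.toNat : Nat) : Int) 60 = ((num.toNat / 60 : Nat) : Int) := by
    exact_mod_cast PySem.Int.floordiv_natCast num.toNat 60
  have hr : PySem.Int.mod ((num.toNat : Nat) : Int) 60 = ((num.toNat % 60 : Nat) : Int) := by
    exact_mod_cast PySem.Int.mod_natCast num.toNat 60
  have hB : gene_eve_alt num =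
      (List.replicate (num.toNat / 60) pvBlock).flatten ++ pvBlock.take (num.toNat % 60) := by
    unfold gene_eve_alt
    rw [hmax, hq, hr, PySem.List.slice_to _ (by positivity)]
    simp
    rw [show (max num 0 / 60).toNat = num.toNat / 60 by omega,
        show (max num 0 % 60).toNat = num.toNat % 60 by omega]
  rw [hA, hB, pvBlock_eq, range_map_eq_tiles]

-- ===== VERDICT (by name: the statement is the Claim_ definition above) =====
theorem gene_eve_spec : Claim_equal_gene_eve := by
  intro num _
  unfold Spec_gene_eve
  exact gene_eve_eq_alt num
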